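-- pv_equiv track=rewrite | github.com/ninggar17/CountryOfTheWorld | CountryOfTheWorld/simulasi_dump_truck.py | get_next_event
-- ===== SOURCE A (Python) =====
-- def get_next_event(events):
--     min_time = events[0]['time']
--     res = []
--     for candidat in range(len(events)):
--         if min_time > events[candidat]['time']:
--             min_time = events[candidat]['time']
--             res = [events[candidat]]
--         elif min_time == events[candidat]['time']:
--             res.append(events[candidat])
--     return res, min_time
-- ===== SOURCE B (Python) =====
-- def get_next_event(events):
--     min_time = events[0]['time']
--     for e in events:
--         t = e['time']
--         if t < min_time:
--             min_time = t
--     res = [e for e in events if e['time'] == min_time]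
--     return res, min_time
-- ===== Notes on version B (the rewrite author's own statement) =====
-- stated objective: idiomatic
-- what changed: A's single fused pass that tracks the running minimum and rebuilds/extends the result list in lockstep is split into two separate passes: one plain minimum scan seeded from events[0]['time'], then a list-comprehension filter of events whose time equals that minimum.
import Mathlib
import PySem

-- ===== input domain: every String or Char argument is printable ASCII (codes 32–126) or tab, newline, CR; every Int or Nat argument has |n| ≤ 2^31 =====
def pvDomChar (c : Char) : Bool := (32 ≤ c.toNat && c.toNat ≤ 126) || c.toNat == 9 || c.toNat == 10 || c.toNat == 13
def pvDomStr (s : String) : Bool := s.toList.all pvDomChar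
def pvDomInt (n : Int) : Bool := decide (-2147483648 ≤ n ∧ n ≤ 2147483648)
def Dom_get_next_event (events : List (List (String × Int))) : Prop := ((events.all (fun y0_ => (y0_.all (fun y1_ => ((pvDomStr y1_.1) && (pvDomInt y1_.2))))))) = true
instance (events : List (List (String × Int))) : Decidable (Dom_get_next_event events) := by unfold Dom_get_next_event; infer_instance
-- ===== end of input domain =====

-- B splits A's fused min-and-collect loop into a minimum scan followed by a filter pass (same O(n) cost).


-- shared helper: e['time'] (key present on every event inside Pre_)
def evTime (e : List (String × Int)) : Int := ((e.lookup "time").getD 0)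

-- A's loop body (one iteration of the fused min-and-collect loop)
def pvStepA (s : Int × List (List (String × Int))) (e : List (String × Int)) :
    Int × List (List (String × Int)) :=
  if evTime e < s.1 then (evTime e, [e])
  else if s.1 = evTime e then (s.1, s.2 ++ [e])
  else s

-- ===== PORT A =====
def get_next_event (events : List (List (String × Int))) : (List (List (String × Int))) × Int :=
  let min_time := evTime (PySem.List.pyGetD events 0 [])
  let st := (PySem.List.pyRange 0 (events.length : Int) 1).foldl
    (fun s j => pvStepA s (PySem.List.pyGetD events j []))
    (min_time, ([] : List (List (String × Int))))
  (st.2, st.1)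

-- ===== PORT B =====
def get_next_event_alt (events : List (List (String × Int))) : (List (List (String × Int))) × Int :=
  let min_time := events.foldl (fun m e => if evTime e < m then evTime e else m)
                    (evTime (PySem.List.pyGetD events 0 []))
  (events.filter (fun e => evTime e == min_time), min_time)

-- ===== PRECONDITION & SPEC =====
-- Pre_ excludes the empty list (events[0] raises IndexError) and events missing the 'time' key (KeyError).
def Pre_get_next_event (events : List (List (String × Int))) : Prop :=
  events ≠ [] ∧ (events.all (fun e => (e.lookup "time").isSome)) = true
instance (events : List (List (String × Int))) : Decidable (Pre_get_next_event events) := by unfold Pre_get_next_event; infer_instance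
def pvWitness_get_next_event : (List (List (String × Int))) := [[("time", 3)], [("time", 1)], [("time", 1)]]
def Spec_get_next_event (events : List (List (String × Int))) (out : (List (List (String × Int))) × Int) : Prop := out = get_next_event_alt events
instance (events : List (List (String × Int))) (out : (List (List (String × Int))) × Int) : Decidable (Spec_get_next_event events out) := by unfold Spec_get_next_event; infer_instance

-- ===== CLAIM (what is proved, stated in full; the proofs are below) =====
def Claim_equal_get_next_event : Prop := ∀ (events : List (List (String × Int))), Dom_get_next_event events → Pre_get_next_event events → Spec_get_next_event events (get_next_event events)

-- ===== LEMMAS AND PROOFS =====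

def fmin (m : Int) (l : List (List (String × Int))) : Int :=
  l.foldl (fun m e => if evTime e < m then evTime e else m) m

theorem fmin_le (l : List (List (String × Int))) (m : Int) : fmin m l ≤ m := by
  induction l generalizing m with
  | nil => simp [fmin]
  | cons e l ih =>
      simp only [fmin, List.foldl_cons]
      by_cases h : evTime e < m
      · simp only [if_pos h]
        exact le_trans (ih (evTime e)) (le_of_lt h)
      · simp only [if_neg h]; exact ih m

theorem loop_eq (l : List (List (String × Int))) (m : Int) (res : List (List (String × Int))) :
    l.foldl pvStepA (m, res)
    = (fmin m l, (if fmin m l = m then res else []) ++ l.filter (fun e => evTime e == fmin m l)) := by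
  induction l generalizing m res with
  | nil => simp [fmin]
  | cons e l ih =>
      simp only [List.foldl_cons, List.filter_cons, pvStepA]
      by_cases h1 : evTime e < m
      · simp only [if_pos h1]
        rw [ih]
        have hm : fmin m (e :: l) = fmin (evTime e) l := by
          simp [fmin, if_pos h1]
        rw [hm]
        have hlt : fmin (evTime e) l < m := lt_of_le_of_lt (fmin_le l (evTime e)) h1
        rw [if_neg (by omega : ¬ fmin (evTime e) l = m)]
        by_cases h2 : fmin (evTime e) l = evTime e
        · rw [if_pos h2]
          have : (evTime e == fmin (evTime e) l) = true := by simp [h2]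
          simp [this]
        · rw [if_neg h2]
          have : (evTime e == fmin (evTime e) l) = false := by
            rw [beq_eq_false_iff_ne]; omega
          simp [this]
      · simp only [if_neg h1]
        have hm : fmin m (e :: l) = fmin m l := by
          simp [fmin, if_neg h1]
        rw [hm]
        by_cases h2 : m = evTime e
        · simp only [if_pos h2]
          rw [ih]
          by_cases h3 : fmin m l = m
          · rw [if_pos h3, if_pos h3]
            have : (evTime e == fmin m l) = true := by rw [beq_iff_eq]; omega
            simp [this]
          · rw [if_neg h3, if_neg h3]
            have hlt : fmin m l < m := lt_of_le_of_ne (fmin_le l m) h3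
            have : (evTime e == fmin m l) = false := by rw [beq_eq_false_iff_ne]; omega
            simp [this]
        · simp only [if_neg h2]
          rw [ih]
          have hgt : m < evTime e := by omega
          have : (evTime e == fmin m l) = false := by
            have := fmin_le l m
            rw [beq_eq_false_iff_ne]; omega
          simp [this]

-- ===== VERDICT (by name: the statement is the Claim_ definition above) =====
theorem get_next_event_spec : Claim_equal_get_next_event := by
  intro events _ _
  simp only [Spec_get_next_event, get_next_event, get_next_event_alt]
  rw [PySem.List.foldl_pyRange_zero_pyGetD' events [] pvStepA _]
  rw [loop_eq]
  simp only [fmin]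
  by_cases h : (events.foldl (fun m e => if evTime e < m then evTime e else m)
      (evTime (PySem.List.pyGetD events 0 []))) = evTime (PySem.List.pyGetD events 0 [])
  · simp [h]
  · simp [h]
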